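-- pv_equiv track=rewrite | github.com/nanxuanhui/CS5592_Assignment2 | Problem2.py | k_labeling
-- ===== SOURCE A (Python) =====
-- def k_labeling(n, m):
--     vertex_labels = {}
--     label = 1
--     center_vertex = 1
--     vertex_labels[center_vertex] = label
--     label += 1
--     current_vertex = 2
--     for i in range(m):
--         previous_vertex = center_vertex
--         for j in range(n):
--             vertex_labels[current_vertex] = label
--             label += 1
--             previous_vertex = current_vertex
--             current_vertex += 1
--     return vertex_labels
-- ===== SOURCE B (Python) =====
-- def k_labeling(n, m):
--     # The loops in A only ever assign label == vertex index; total vertex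
--     # count is the center plus m*n rim vertices (none when n or m <= 0).
--     count = max(m, 0) * max(n, 0) + 1
--     return {v: v for v in range(1, count + 1)}
-- ===== Notes on version B (the rewrite author's own statement) =====
-- stated objective: simpler
-- what changed: Replaced the nested loops with dead previous_vertex/current_vertex bookkeeping by a computed vertex count max(m,0)*max(n,0)+1 and a single identity dict comprehension.
import Mathlib
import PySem

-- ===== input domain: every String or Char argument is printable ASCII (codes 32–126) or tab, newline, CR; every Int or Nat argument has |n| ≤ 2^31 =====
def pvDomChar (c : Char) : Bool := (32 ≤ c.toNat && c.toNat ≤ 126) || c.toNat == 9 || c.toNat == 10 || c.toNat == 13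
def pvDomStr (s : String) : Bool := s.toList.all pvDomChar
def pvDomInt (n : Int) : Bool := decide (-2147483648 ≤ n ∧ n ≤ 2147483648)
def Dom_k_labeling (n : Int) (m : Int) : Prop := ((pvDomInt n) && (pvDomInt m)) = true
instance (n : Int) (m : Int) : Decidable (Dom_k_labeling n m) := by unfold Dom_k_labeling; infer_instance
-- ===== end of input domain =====

-- B replaces the nested loops (with dead previous_vertex bookkeeping) by a computed
-- vertex count and one flat identity-dict pass; same return value.

-- ===== PORT A =====
-- loop state: (vertex_labels, label, current_vertex); A's previous_vertex is written but
-- never read, so it is omitted from the ported state (it cannot affect the result)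
def k_labeling (n : Int) (m : Int) : List (Int × Int) :=
  ((PySem.List.pyRange 0 m 1).foldl
      (fun (s : PySem.Dict Int Int × Int × Int) _ =>
        (PySem.List.pyRange 0 n 1).foldl
          (fun (t : PySem.Dict Int Int × Int × Int) _ =>
            (t.1.insert t.2.2 t.2.1, t.2.1 + 1, t.2.2 + 1)) s)
      ((PySem.Dict.empty : PySem.Dict Int Int).insert 1 1, 2, 2)).1.items

-- ===== PORT B =====
def k_labeling_alt (n : Int) (m : Int) : List (Int × Int) :=
  (PySem.List.pyRange 1 ((max m 0 * max n 0 + 1) + 1) 1).map (fun v => (v, v))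

-- ===== PRECONDITION & SPEC =====
def Spec_k_labeling (n : Int) (m : Int) (out : List (Int × Int)) : Prop := out = k_labeling_alt n m
instance (n : Int) (m : Int) (out : List (Int × Int)) : Decidable (Spec_k_labeling n m out) := by unfold Spec_k_labeling; infer_instance

-- ===== CLAIM (what is proved, stated in full; the proofs are below) =====
def Claim_equal_k_labeling : Prop := ∀ (n : Int) (m : Int), Dom_k_labeling n m → Spec_k_labeling n m (k_labeling n m)

-- ===== LEMMAS AND PROOFS =====

-- identity pairs (c+0,c+0), …, (c+a-1,c+a-1)
def diagRange (c : Int) (a : Nat) : List (Int × Int) :=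
  (List.range a).map (fun k : Nat => (c + (k : Int), c + (k : Int)))

theorem diagRange_succ (c : Int) (a : Nat) :
    diagRange c (a + 1) = diagRange c a ++ [(c + a, c + a)] := by
  unfold diagRange
  rw [List.range_succ, List.map_append]
  simp

theorem diagRange_cons (c : Int) (a : Nat) :
    diagRange c (a + 1) = (c, c) :: diagRange (c + 1) a := by
  induction a with
  | zero => simp [diagRange]
  | succ a ih =>
    rw [diagRange_succ, ih, diagRange_succ]
    simp only [List.cons_append]
    refine congrArg _ (congrArg _ ?_)
    have : (c + (↑a + 1) : Int) = c + 1 + ↑a := by ring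
    simp [this]

theorem diagRange_append (c : Int) (a b : Nat) :
    diagRange c a ++ diagRange (c + a) b = diagRange c (a + b) := by
  induction b with
  | zero => simp [diagRange]
  | succ b ih =>
    rw [diagRange_succ, show a + (b + 1) = (a + b) + 1 by ring, diagRange_succ,
        ← List.append_assoc, ih]
    have : (c + ↑a + ↑b : Int) = c + ↑(a + b) := by push_cast; ring
    simp [this]

theorem mem_keys_diagRange {x : Int} {c : Int} {a : Nat}
    (h : x ∈ (diagRange c a).map (·.1)) : c ≤ x ∧ x < c + a := by
  simp only [diagRange, List.map_map, List.mem_map, List.mem_range, Function.comp] at h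
  obtain ⟨k, hk, rfl⟩ := h
  omega

-- one inner loop pass appends diagRange c L.length and advances label = current_vertex by L.length
theorem innerFold (L : List Int) (d : PySem.Dict Int Int) (c : Int)
    (h : ∀ k ∈ d.keys, k < c) :
    L.foldl (fun (t : PySem.Dict Int Int × Int × Int) _ =>
        (t.1.insert t.2.2 t.2.1, t.2.1 + 1, t.2.2 + 1)) (d, c, c)
      = (⟨d.items ++ diagRange c L.length⟩, c + L.length, c + L.length) := by
  induction L generalizing d c with
  | nil => simp [diagRange]
  | cons x L ih =>
    simp only [List.foldl_cons]
    have hnc : d.contains c = false := by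
      rw [Bool.eq_false_iff]
      intro hc
      exact absurd (h c ((PySem.Dict.contains_iff_mem_keys _ _).mp hc)) (lt_irrefl c)
    have hins : d.insert c c = ⟨d.items ++ [(c, c)]⟩ :=
      PySem.Dict.ext (PySem.Dict.items_insert_of_not_contains _ _ hnc)
    have hkeys : ∀ k ∈ (PySem.Dict.mk (d.items ++ [(c, c)]) : PySem.Dict Int Int).keys, k < c + 1 := by
      intro k hk
      simp only [PySem.Dict.keys, List.map_append, List.mem_append] at hk
      rcases hk with hk | hk
      · exact lt_trans (h k hk) (by omega)
      · simp at hk; omega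
    rw [hins, ih _ _ hkeys]
    simp only [List.length_cons]
    rw [List.append_assoc,
        show [(c, c)] ++ diagRange (c + 1) L.length = diagRange c (L.length + 1) from
          (diagRange_cons c L.length).symm]
    rw [Prod.ext_iff, Prod.ext_iff]
    exact ⟨rfl, by push_cast; ring, by push_cast; ring⟩

-- the outer loop: L.length passes of the inner loop, n.toNat new vertices each
theorem outerFold (L : List Int) (n : Int) (d : PySem.Dict Int Int) (c : Int)
    (h : ∀ k ∈ d.keys, k < c) :
    L.foldl (fun (s : PySem.Dict Int Int × Int × Int) _ =>
        (PySem.List.pyRange 0 n 1).foldl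
          (fun (t : PySem.Dict Int Int × Int × Int) _ =>
            (t.1.insert t.2.2 t.2.1, t.2.1 + 1, t.2.2 + 1)) s) (d, c, c)
      = (⟨d.items ++ diagRange c (L.length * n.toNat)⟩,
         c + L.length * n.toNat, c + L.length * n.toNat) := by
  induction L generalizing d c with
  | nil => simp [diagRange]
  | cons x L ih =>
    simp only [List.foldl_cons]
    have hlen : (PySem.List.pyRange 0 n 1).length = n.toNat := by
      rw [PySem.List.length_pyRange_one]; simp
    rw [innerFold _ d c h, hlen]
    have hkeys : ∀ k ∈ (PySem.Dict.mk (d.items ++ diagRange c n.toNat) : PySem.Dict Int Int).keys,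
        k < c + n.toNat := by
      intro k hk
      simp only [PySem.Dict.keys, List.map_append, List.mem_append] at hk
      rcases hk with hk | hk
      · exact lt_of_lt_of_le (h k hk) (by omega)
      · exact (mem_keys_diagRange hk).2
    rw [ih _ _ hkeys]
    simp only [List.length_cons]
    rw [List.append_assoc, diagRange_append,
        show (L.length + 1) * n.toNat = n.toNat + L.length * n.toNat by ring]
    rw [Prod.ext_iff, Prod.ext_iff]
    exact ⟨rfl, by push_cast; ring, by push_cast; ring⟩

theorem k_labeling_eq (n m : Int) :
    k_labeling n m = (1, 1) :: diagRange 2 (m.toNat * n.toNat) := by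
  unfold k_labeling
  have hd0 : ((PySem.Dict.empty : PySem.Dict Int Int).insert 1 1) = ⟨[(1, 1)]⟩ :=
    PySem.Dict.ext (by
      rw [PySem.Dict.items_insert_of_not_contains _ _ (by simp)]
      simp [PySem.Dict.empty])
  rw [hd0]
  have hk : ∀ k ∈ (PySem.Dict.mk [((1 : Int), (1 : Int))]).keys, k < 2 := by
    intro k hk; simp [PySem.Dict.keys] at hk; omega
  rw [outerFold _ n _ 2 hk]
  rw [PySem.List.length_pyRange_one]
  simp

theorem k_labeling_alt_eq (n m : Int) :
    k_labeling_alt n m = diagRange 1 (m.toNat * n.toNat + 1) := by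
  unfold k_labeling_alt diagRange
  have hmax : max m 0 * max n 0 = ((m.toNat * n.toNat : Nat) : Int) := by
    rw [← Int.toNat_eq_max, ← Int.toNat_eq_max]; push_cast; ring
  rw [PySem.List.pyRange_one,
      show (max m 0 * max n 0 + 1 + 1 - 1 : Int) = ((m.toNat * n.toNat : Nat) : Int) + 1 by
        rw [hmax]; ring,
      show ((((m.toNat * n.toNat : Nat) : Int)) + 1).toNat = m.toNat * n.toNat + 1 by omega]
  simp [Function.comp]

-- ===== VERDICT (by name: the statement is the Claim_ definition above) =====
theorem k_labeling_spec : Claim_equal_k_labeling := by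
  intro n m _
  show k_labeling n m = k_labeling_alt n m
  rw [k_labeling_eq, k_labeling_alt_eq, diagRange_cons]
  norm_num
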